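-- pv_equiv track=rewrite | github.com/Humanmademovies/Doom | world/sprite_analyzer.py | create_logo_definition
-- ===== SOURCE A (Python) =====
-- def create_logo_definition(size=64, bar_thickness=16):
--     """
--     Crée la définition du logo (croix noire sur fond gris foncé)
--     pour une taille donnée.
--     """
--     logo_def = []
--     half_size = size // 2
--     half_bar = bar_thickness // 2
--
--     for y in range(size):
--         row = []
--         for x in range(size):
--             # Vérifie si le pixel est dans la barre horizontale ou verticale
--             if (half_size - half_bar <= x < half_size + half_bar) or \
--                (half_size - half_bar <= y < half_size + half_bar):
--                 row.append((0, 0, 0)) # Noir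
--             else:
--                 row.append((100, 100, 100)) # Gris foncé
--         logo_def.append(row)
--
--     return logo_def
-- ===== SOURCE B (Python) =====
-- def create_logo_definition(size=64, bar_thickness=16):
--     half_size = size // 2
--     half_bar = bar_thickness // 2
--     lo = half_size - half_bar
--     hi = half_size + half_bar
--     template = [(0, 0, 0) if lo <= x < hi else (100, 100, 100) for x in range(size)]
--     logo_def = []
--     for y in range(size):
--         if lo <= y < hi:
--             logo_def.append([(0, 0, 0)] * size)
--         else:
--             logo_def.append(list(template))
--     return logo_def
-- ===== Notes on version B (the rewrite author's own statement) =====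
-- stated objective: simpler
-- what changed: Replaced the per-pixel nested OR-test loop by computing one 'mixed' template row once and then, per row, dispatching between an all-black row (list repetition) and a copy of the template.
import Mathlib
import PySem

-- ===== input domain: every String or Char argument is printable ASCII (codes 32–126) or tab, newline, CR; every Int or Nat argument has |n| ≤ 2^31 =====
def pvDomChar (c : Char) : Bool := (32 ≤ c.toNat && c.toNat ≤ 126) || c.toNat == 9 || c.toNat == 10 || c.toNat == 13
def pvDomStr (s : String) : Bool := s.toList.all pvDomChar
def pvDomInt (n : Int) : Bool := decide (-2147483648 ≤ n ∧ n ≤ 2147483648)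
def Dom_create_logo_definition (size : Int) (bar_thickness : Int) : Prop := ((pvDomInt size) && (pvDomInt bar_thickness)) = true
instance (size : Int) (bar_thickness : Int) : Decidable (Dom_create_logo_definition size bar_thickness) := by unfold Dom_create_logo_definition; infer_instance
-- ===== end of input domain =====

-- B replaces A's per-pixel double loop by building one mixed template row and, per row,
-- dispatching between an all-black row and a copy of the template (objective: simpler).

-- ===== PORT A =====
def create_logo_definition (size : Int) (bar_thickness : Int) : List (List (Int × Int × Int)) :=
  let half_size := PySem.Int.floordiv size 2
  let half_bar := PySem.Int.floordiv bar_thickness 2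
  (PySem.List.pyRange 0 size 1).foldl (fun logo_def y =>
    logo_def ++ [(PySem.List.pyRange 0 size 1).foldl (fun row x =>
      row ++ [if (half_size - half_bar ≤ x ∧ x < half_size + half_bar) ∨
                 (half_size - half_bar ≤ y ∧ y < half_size + half_bar)
              then ((0, 0, 0) : Int × Int × Int) else (100, 100, 100)]) []]) []

-- ===== PORT B =====
def create_logo_definition_alt (size : Int) (bar_thickness : Int) : List (List (Int × Int × Int)) :=
  let half_size := PySem.Int.floordiv size 2
  let half_bar := PySem.Int.floordiv bar_thickness 2
  let lo := half_size - half_bar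
  let hi := half_size + half_bar
  let template := (PySem.List.pyRange 0 size 1).map (fun x =>
    if lo ≤ x ∧ x < hi then ((0, 0, 0) : Int × Int × Int) else (100, 100, 100))
  (PySem.List.pyRange 0 size 1).foldl (fun logo_def y =>
    logo_def ++ [if lo ≤ y ∧ y < hi
                 then List.replicate size.toNat ((0, 0, 0) : Int × Int × Int)
                 else template]) []

-- ===== PRECONDITION & SPEC =====
def Spec_create_logo_definition (size : Int) (bar_thickness : Int) (out : List (List (Int × Int × Int))) : Prop := out = create_logo_definition_alt size bar_thickness
instance (size : Int) (bar_thickness : Int) (out : List (List (Int × Int × Int))) : Decidable (Spec_create_logo_definition size bar_thickness out) := by unfold Spec_create_logo_definition; infer_instance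

-- ===== CLAIM (what is proved, stated in full; the proofs are below) =====
def Claim_equal_create_logo_definition : Prop := ∀ (size : Int) (bar_thickness : Int), Dom_create_logo_definition size bar_thickness → Spec_create_logo_definition size bar_thickness (create_logo_definition size bar_thickness)

-- ===== LEMMAS AND PROOFS =====

theorem pvFoldlSnoc {α β : Type} (f : α → β) (l : List α) (acc : List β) :
    l.foldl (fun r x => r ++ [f x]) acc = acc ++ l.map f := by
  induction l generalizing acc with
  | nil => simp
  | cons a t ih => simp [ih]

-- ===== VERDICT (by name: the statement is the Claim_ definition above) =====
theorem create_logo_definition_spec : Claim_equal_create_logo_definition := by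
  intro size bar_thickness _
  unfold Spec_create_logo_definition create_logo_definition create_logo_definition_alt
  simp only [pvFoldlSnoc, List.nil_append]
  apply List.map_congr_left
  intro y _
  by_cases hy : PySem.Int.floordiv size 2 - PySem.Int.floordiv bar_thickness 2 ≤ y ∧
      y < PySem.Int.floordiv size 2 + PySem.Int.floordiv bar_thickness 2
  · rw [if_pos hy]
    have : ∀ x : Int,
        (if (PySem.Int.floordiv size 2 - PySem.Int.floordiv bar_thickness 2 ≤ x ∧
             x < PySem.Int.floordiv size 2 + PySem.Int.floordiv bar_thickness 2) ∨
            (PySem.Int.floordiv size 2 - PySem.Int.floordiv bar_thickness 2 ≤ y ∧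
             y < PySem.Int.floordiv size 2 + PySem.Int.floordiv bar_thickness 2)
         then ((0, 0, 0) : Int × Int × Int) else (100, 100, 100)) = (0, 0, 0) := by
      intro x; exact if_pos (Or.inr hy)
    simp only [this, List.map_const', PySem.List.length_pyRange_one]
    congr 1
    omega
  · rw [if_neg hy]
    apply List.map_congr_left
    intro x _
    exact if_congr (or_iff_left hy) rfl rfl
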